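-- pv_equiv track=rewrite | github.com/Rianico/harness-zkx | skills/scraper/scripts/scrapers/cuda_api.py | _remove_see_also
-- ===== SOURCE A (Python) =====
-- def _remove_see_also(content: str) -> str:
--     """Remove 'See also:' sections."""
--     lines = content.split("\n")
--     cleaned_lines = []
--     in_see_also = False
--
--     for line in lines:
--         if line.strip() == "**See also:**":
--             in_see_also = True
--             continue
--
--         if in_see_also:
--             if (
--                 line.startswith("#")
--                 or line.startswith("[CUresult]")
--                 or line.startswith("[void]")
--             ):
--                 in_see_also = False
--                 cleaned_lines.append(line)
--             continue
--
--         cleaned_lines.append(line)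
--
--     return "\n".join(cleaned_lines)
-- ===== SOURCE B (Python) =====
-- def _remove_see_also(content: str) -> str:
--     """Remove 'See also:' sections."""
--     lines = content.split("\n")
--     out = []
--     rest = lines
--     while True:
--         idx = next((i for i, l in enumerate(rest) if l.strip() == "**See also:**"), None)
--         if idx is None:
--             out.extend(rest)
--             break
--         out.extend(rest[:idx])
--         tail = rest[idx + 1:]
--         j = next((i for i, l in enumerate(tail)
--                   if l.startswith(("#", "[CUresult]", "[void]"))), None)
--         if j is None:
--             rest = []
--         else:
--             rest = tail[j:]
--     return "\n".join(out)
-- ===== Notes on version B (the rewrite author's own statement) =====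
-- stated objective: alternative
-- what changed: Replaced A's per-line boolean-flag state machine by a find-and-slice algorithm: repeatedly search for the next marker line, copy the whole preceding slice, search for the block's terminator and jump straight to it.
import Mathlib
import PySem

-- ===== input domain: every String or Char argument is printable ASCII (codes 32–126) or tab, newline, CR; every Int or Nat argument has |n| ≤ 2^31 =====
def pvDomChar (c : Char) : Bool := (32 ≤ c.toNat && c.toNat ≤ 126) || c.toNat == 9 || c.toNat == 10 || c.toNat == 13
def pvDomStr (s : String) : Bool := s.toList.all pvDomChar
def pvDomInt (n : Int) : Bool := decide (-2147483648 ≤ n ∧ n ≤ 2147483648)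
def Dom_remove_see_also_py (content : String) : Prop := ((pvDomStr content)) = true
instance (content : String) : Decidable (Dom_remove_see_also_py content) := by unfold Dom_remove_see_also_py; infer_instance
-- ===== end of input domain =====

-- B replaces A's per-line boolean-flag state machine by a find-and-slice algorithm:
-- search for the next marker line, copy the preceding slice wholesale, search for the
-- block's terminator and jump straight to it (objective: alternative).

-- ===== PORT A =====
-- one step of A's for-loop: state = (cleaned_lines, in_see_also)
def pvAStep (st : List String × Bool) (line : String) : List String × Bool :=
  if PySem.Str.strip line = "**See also:**" then (st.1, true)
  else if st.2 then
    (if PySem.Str.startswith line "#" || PySem.Str.startswith line "[CUresult]"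
        || PySem.Str.startswith line "[void]" then (st.1 ++ [line], false) else st)
  else (st.1 ++ [line], st.2)

def remove_see_also_py (content : String) : String :=
  PySem.Str.join "\n" ((((PySem.Str.split? content "\n").getD []).foldl pvAStep ([], false)).1)

-- ===== PORT B =====
-- the two searches of Source B (next(... enumerate ...)) are List.findIdx?
def pvMarker (l : String) : Bool := PySem.Str.strip l == "**See also:**"
def pvTerm (t : String) : Bool :=
  PySem.Str.startswith t "#" || PySem.Str.startswith t "[CUresult]" || PySem.Str.startswith t "[void]"

-- Source B's while loop: `out` is outAcc, `rest` the current slice; rest[:idx]/rest[idx+1:]/tail[j:]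
-- are take/drop (all indices here are nonnegative and in range, where Python slices = take/drop);
-- the `j is None` arm (Python: rest = [], then the final iteration appends nothing and breaks)
-- is returned directly.
def pvBLoop (outAcc : List String) (rest : List String) : List String :=
  match h : rest.findIdx? pvMarker with
  | none => outAcc ++ rest
  | some idx =>
    match (rest.drop (idx + 1)).findIdx? pvTerm with
    | none => outAcc ++ rest.take idx
    | some j => pvBLoop (outAcc ++ rest.take idx) ((rest.drop (idx + 1)).drop j)
termination_by rest.length
decreasing_by
  have hne : rest ≠ [] := by intro hnil; rw [hnil] at h; simp at h
  have : 0 < rest.length := List.length_pos_iff.mpr hne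
  simp [List.length_drop]; omega

def remove_see_also_py_alt (content : String) : String :=
  PySem.Str.join "\n" (pvBLoop [] ((PySem.Str.split? content "\n").getD []))

-- ===== PRECONDITION & SPEC =====
def Spec_remove_see_also_py (content : String) (out : String) : Prop := out = remove_see_also_py_alt content
instance (content : String) (out : String) : Decidable (Spec_remove_see_also_py content out) := by unfold Spec_remove_see_also_py; infer_instance

-- ===== CLAIM (what is proved, stated in full; the proofs are below) =====
def Claim_equal_remove_see_also_py : Prop := ∀ (content : String), Dom_remove_see_also_py content → Spec_remove_see_also_py content (remove_see_also_py content)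

-- ===== LEMMAS AND PROOFS =====

-- proof-side intermediate: A's flag state machine written as a mutual recursion
mutual
def pvBOuter : List String → List String
  | [] => []
  | line :: rest =>
    if PySem.Str.strip line = "**See also:**" then pvBSkip rest
    else line :: pvBOuter rest
def pvBSkip : List String → List String
  | [] => []
  | t :: rest =>
    if pvTerm t then t :: pvBOuter rest
    else pvBSkip rest
end

theorem pvRstrip_cons (c : Char) (cs : List Char) (hc : PySem.Chars.isspace c = false) :
    PySem.Chars.rstrip (c :: cs) = c :: PySem.Chars.rstrip cs := by
  unfold PySem.Chars.rstrip
  rw [List.reverse_cons, List.dropWhile_append]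
  by_cases h : List.dropWhile PySem.Chars.isspace cs.reverse = [] <;>
    simp [h, List.dropWhile, hc]

theorem pvStrip_cons (c : Char) (cs : List Char) (hc : PySem.Chars.isspace c = false) :
    PySem.Chars.strip (c :: cs) = c :: PySem.Chars.rstrip cs := by
  unfold PySem.Chars.strip PySem.Chars.lstrip
  rw [List.dropWhile_cons_of_neg (by simp [hc])]
  exact pvRstrip_cons c cs hc

-- a terminator line never strips to the marker (its first char is '#' or '[')
theorem pvHead_ne (line : String) (c : Char) (t : List Char) (hl : line.toList = c :: t)
    (hc : PySem.Chars.isspace c = false) (hne : c ≠ '*') :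
    ¬ (PySem.Str.strip line = "**See also:**") := by
  intro hm
  have h1 : (PySem.Str.strip line).toList = "**See also:**".toList := by rw [hm]
  rw [PySem.Str.toList_strip, hl, pvStrip_cons c t hc,
      show "**See also:**".toList = ['*','*','S','e','e',' ','a','l','s','o',':','*','*'] from by decide] at h1
  exact hne (List.head_eq_of_cons_eq h1)

theorem pvTerm_ne_marker (line : String) (ht : pvTerm line = true) :
    ¬ (PySem.Str.strip line = "**See also:**") := by
  unfold pvTerm at ht
  simp only [Bool.or_eq_true, PySem.Str.startswith_eq] at ht
  rcases ht with (h | h) | h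
  · obtain ⟨t, htl⟩ := (PySem.Chars.startswith_iff _ _).1 h
    exact pvHead_ne line '#' t
      (by rw [← htl, show "#".toList = ['#'] from by decide]; rfl) (by decide) (by decide)
  · obtain ⟨t, htl⟩ := (PySem.Chars.startswith_iff _ _).1 h
    exact pvHead_ne line '[' (['C','U','r','e','s','u','l','t',']'] ++ t)
      (by rw [← htl, show "[CUresult]".toList = ['[','C','U','r','e','s','u','l','t',']'] from by decide]; rfl)
      (by decide) (by decide)
  · obtain ⟨t, htl⟩ := (PySem.Chars.startswith_iff _ _).1 h
    exact pvHead_ne line '[' (['v','o','i','d',']'] ++ t)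
      (by rw [← htl, show "[void]".toList = ['[','v','o','i','d',']'] from by decide]; rfl)
      (by decide) (by decide)

theorem pvMarker_iff (l : String) : pvMarker l = true ↔ PySem.Str.strip l = "**See also:**" := by
  unfold pvMarker; exact beq_iff_eq

-- A's fold equals the state machine
theorem pvFold_eq (ls : List String) : ∀ acc : List String,
    ((ls.foldl pvAStep (acc, false)).1 = acc ++ pvBOuter ls)
    ∧ ((ls.foldl pvAStep (acc, true)).1 = acc ++ pvBSkip ls) := by
  induction ls with
  | nil => intro acc; simp [pvBOuter, pvBSkip]
  | cons line rest ih =>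
    intro acc
    by_cases hm : PySem.Str.strip line = "**See also:**"
    · have ht : pvTerm line = false := by
        cases h : pvTerm line
        · rfl
        · exact absurd hm (pvTerm_ne_marker line h)
      constructor
      · rw [List.foldl_cons, show pvAStep (acc, false) line = (acc, true) by
          simp [pvAStep, hm]]
        simp [pvBOuter, hm, (ih acc).2]
      · rw [List.foldl_cons, show pvAStep (acc, true) line = (acc, true) by
          simp [pvAStep, hm]]
        simp [pvBSkip, ht, (ih acc).2]
    · constructor
      · rw [List.foldl_cons, show pvAStep (acc, false) line = (acc ++ [line], false) by
          simp [pvAStep, hm]]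
        simp [pvBOuter, hm, (ih (acc ++ [line])).1]
      · cases ht : pvTerm line with
        | true =>
          have ht' := ht; unfold pvTerm at ht'
          rw [List.foldl_cons, show pvAStep (acc, true) line = (acc ++ [line], false) by
            unfold pvAStep; rw [if_neg hm]; simp only [ht']; rfl]
          simp [pvBSkip, ht, (ih (acc ++ [line])).1]
        | false =>
          have ht' := ht; unfold pvTerm at ht'
          rw [List.foldl_cons, show pvAStep (acc, true) line = (acc, true) by
            unfold pvAStep; rw [if_neg hm]; simp only [ht']; rfl]
          simp [pvBSkip, ht, (ih acc).2]

-- the state machine on marker-free input copies it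
theorem pvNoMarker_outer : ∀ ls : List String, (∀ l ∈ ls, pvMarker l = false) → pvBOuter ls = ls := by
  intro ls
  induction ls with
  | nil => intro _; rfl
  | cons x r ih =>
    intro h
    have hx : ¬ PySem.Str.strip x = "**See also:**" := by
      intro hc
      have := (pvMarker_iff x).2 hc
      rw [h x (by simp)] at this
      exact Bool.false_ne_true this
    simp [pvBOuter, hx, ih (fun l hl => h l (by simp [hl]))]

-- the state machine through a marker-free prefix followed by a marker
theorem pvOuter_marker (m : String) (tail : List String) (hm : pvMarker m = true) :
    ∀ pre : List String, (∀ l ∈ pre, pvMarker l = false) →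
    pvBOuter (pre ++ m :: tail) = pre ++ pvBSkip tail := by
  intro pre
  induction pre with
  | nil => intro _; simp [pvBOuter, (pvMarker_iff m).1 hm]
  | cons x r ih =>
    intro h
    have hx : ¬ PySem.Str.strip x = "**See also:**" := by
      intro hc
      have := (pvMarker_iff x).2 hc
      rw [h x (by simp)] at this
      exact Bool.false_ne_true this
    simp [pvBOuter, hx, ih (fun l hl => h l (by simp [hl]))]

-- the skipper drops a terminator-free list entirely
theorem pvNoTerm_skip : ∀ ls : List String, (∀ l ∈ ls, pvTerm l = false) → pvBSkip ls = [] := by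
  intro ls
  induction ls with
  | nil => intro _; rfl
  | cons x r ih =>
    intro h
    simp [pvBSkip, h x (by simp), ih (fun l hl => h l (by simp [hl]))]

-- the skipper through a terminator-free prefix followed by a terminator
theorem pvSkip_term (t : String) (r2 : List String) (ht : pvTerm t = true) :
    ∀ sk : List String, (∀ l ∈ sk, pvTerm l = false) →
    pvBSkip (sk ++ t :: r2) = t :: pvBOuter r2 := by
  intro sk
  induction sk with
  | nil => intro _; simp [pvBSkip, ht]
  | cons x r ih =>
    intro h
    simp [pvBSkip, h x (by simp), ih (fun l hl => h l (by simp [hl]))]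

-- decomposition of a list at the index found by findIdx?
theorem pvFindIdx_split {p : String → Bool} {ls : List String} {i : Nat}
    (h : ls.findIdx? p = some i) :
    ls = ls.take i ++ ls.drop i
    ∧ (∀ l ∈ ls.take i, p l = false)
    ∧ ∃ (hi : i < ls.length), p ls[i] = true ∧ ls.drop i = ls[i] :: ls.drop (i + 1) := by
  obtain ⟨hi, hp, hbefore⟩ := List.findIdx?_eq_some_iff_getElem.mp h
  refine ⟨(List.take_append_drop i ls).symm, ?_, hi, hp, by rw [List.getElem_cons_drop]⟩
  intro l hl
  obtain ⟨j, hj, hget⟩ := List.mem_take_iff_getElem.mp hl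
  subst hget
  have hji : j < i := lt_of_lt_of_le hj (min_le_left _ _)
  cases hpl : p ls[j] with
  | false => rfl
  | true => exact absurd hpl (hbefore j hji)

-- main invariant: the find-and-slice loop computes the state machine's output
theorem pvBLoop_eq (n : Nat) : ∀ ls : List String, ls.length ≤ n → ∀ acc : List String,
    pvBLoop acc ls = acc ++ pvBOuter ls := by
  induction n with
  | zero =>
    intro ls hlen acc
    have : ls = [] := List.eq_nil_of_length_eq_zero (Nat.le_zero.mp hlen)
    subst this
    rw [pvBLoop]
    simp [pvBOuter]
  | succ n ih =>
    intro ls hlen acc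
    rw [pvBLoop]
    split
    · -- no marker anywhere
      next heq =>
        rw [pvNoMarker_outer ls (List.findIdx?_eq_none_iff.mp heq)]
    · next idx heq =>
        obtain ⟨hsplit, hprefree, hi, hpm, hdropeq⟩ := pvFindIdx_split heq
        have houter : pvBOuter ls = ls.take idx ++ pvBSkip (ls.drop (idx + 1)) := by
          conv_lhs => rw [hsplit, hdropeq]
          exact pvOuter_marker _ _ hpm _ hprefree
        split
        · -- no terminator in the tail
          next heq2 =>
            rw [houter, pvNoTerm_skip _ (List.findIdx?_eq_none_iff.mp heq2)]
            simp
        · next j heq2 =>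
            obtain ⟨hsplit2, hskipfree, hj, hpt, hdropeq2⟩ := pvFindIdx_split heq2
            have hlen2 : ((ls.drop (idx + 1)).drop j).length ≤ n := by
              have h0 : 0 < ls.length := by omega
              simp only [List.length_drop]
              omega
            rw [ih _ hlen2 (acc ++ ls.take idx), hdropeq2, houter]
            conv_rhs => rw [hsplit2, hdropeq2, pvSkip_term _ _ hpt _ hskipfree]
            have hnm : ¬ PySem.Str.strip (ls.drop (idx + 1))[j] = "**See also:**" :=
              pvTerm_ne_marker _ hpt
            have hout2 : pvBOuter ((ls.drop (idx + 1))[j] :: (ls.drop (idx + 1)).drop (j + 1))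
                = (ls.drop (idx + 1))[j] :: pvBOuter ((ls.drop (idx + 1)).drop (j + 1)) := by
              rw [pvBOuter, if_neg hnm]
            rw [hout2]
            simp

-- ===== VERDICT (by name: the statement is the Claim_ definition above) =====
theorem remove_see_also_py_spec : Claim_equal_remove_see_also_py := by
  intro content _
  unfold Spec_remove_see_also_py remove_see_also_py remove_see_also_py_alt
  rw [(pvFold_eq ((PySem.Str.split? content "\n").getD []) []).1,
      pvBLoop_eq ((PySem.Str.split? content "\n").getD []).length _ (le_refl _) []]
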